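-- pv_equiv track=rewrite | github.com/NicolasMalassis/Secu_App | Game_Over.py | troisCons
-- ===== SOURCE A (Python) =====
-- def troisCons(mot):
--     cmptCons = 0
--     for i in range(0,len(mot)):
--         c = mot[i]
--         if(c != 'a' and c != 'e' and c != 'i' and c != 'o' and c != 'u' and c != 'y'):
--             cmptCons+=1
--         else:
--             cmptCons=0
--     if(cmptCons >= 3):
--       return True
--     return False
-- ===== SOURCE B (Python) =====
-- def troisCons(mot):
--     return len(mot) >= 3 and all(c not in 'aeiouy' for c in mot[-3:])
-- ===== Notes on version B (the rewrite author's own statement) =====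
-- stated objective: simpler
-- what changed: Replaces the full left-to-right scan with a running consonant counter by a direct test that the word has length >= 3 and its last three characters are all outside the lowercase vowel set.
import Mathlib
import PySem

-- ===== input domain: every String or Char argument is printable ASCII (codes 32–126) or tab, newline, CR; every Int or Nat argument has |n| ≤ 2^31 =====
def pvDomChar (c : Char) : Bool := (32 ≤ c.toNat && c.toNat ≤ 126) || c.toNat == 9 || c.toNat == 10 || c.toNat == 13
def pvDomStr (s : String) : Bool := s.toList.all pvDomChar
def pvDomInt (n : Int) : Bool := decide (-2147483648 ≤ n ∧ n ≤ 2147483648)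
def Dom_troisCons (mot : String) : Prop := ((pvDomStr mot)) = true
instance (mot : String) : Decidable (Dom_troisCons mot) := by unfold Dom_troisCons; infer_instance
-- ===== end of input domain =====

-- B replaces A's full scan with a consonant counter by a direct O(1) test of the last three characters (objective: simpler).


-- ===== PORT A =====
-- A's loop body: increment the counter on a non-vowel, reset it to 0 on a vowel
def stepA (cmptCons : Int) (c : Char) : Int :=
  if c ≠ 'a' ∧ c ≠ 'e' ∧ c ≠ 'i' ∧ c ≠ 'o' ∧ c ≠ 'u' ∧ c ≠ 'y' then cmptCons + 1 else 0

-- the loop over mot with the running consonant counter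
def troisCons (mot : String) : Bool :=
  let cmptCons : Int := mot.toList.foldl stepA 0
  if cmptCons ≥ 3 then true else false

-- ===== PORT B =====
-- c not in 'aeiouy'
def notVowel (c : Char) : Bool := !("aeiouy".toList.contains c)

-- len(mot) >= 3 and all(c not in 'aeiouy' for c in mot[-3:])
def troisCons_alt (mot : String) : Bool :=
  decide (mot.toList.length ≥ 3) &&
    (PySem.List.slice mot.toList (some (-3)) none).all notVowel

-- ===== PRECONDITION & SPEC =====
def Spec_troisCons (mot : String) (out : Bool) : Prop := out = troisCons_alt mot
instance (mot : String) (out : Bool) : Decidable (Spec_troisCons mot out) := by unfold Spec_troisCons; infer_instance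

-- ===== CLAIM (what is proved, stated in full; the proofs are below) =====
def Claim_equal_troisCons : Prop := ∀ (mot : String), Dom_troisCons mot → Spec_troisCons mot (troisCons mot)

-- ===== LEMMAS AND PROOFS =====

theorem stepA_eq (cmpt : Int) (c : Char) :
    stepA cmpt c = if notVowel c then cmpt + 1 else 0 := by
  unfold stepA notVowel
  by_cases ha : c = 'a' <;> by_cases he : c = 'e' <;> by_cases hi : c = 'i' <;>
    by_cases ho : c = 'o' <;> by_cases hu : c = 'u' <;> by_cases hy : c = 'y' <;>
    simp_all

-- the counter after the whole scan is the length of the trailing non-vowel run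
theorem counter_eq (l : List Char) :
    l.foldl stepA 0 = ((l.reverse.takeWhile notVowel).length : Int) := by
  induction l using List.reverseRecOn with
  | nil => simp
  | append_singleton l c ih =>
      rw [List.foldl_append]
      simp only [List.foldl_cons, List.foldl_nil, List.reverse_append, List.reverse_singleton,
        List.singleton_append, List.takeWhile_cons]
      rw [stepA_eq, ih]
      by_cases h : notVowel c <;> simp [h]

-- the trailing run has length ≥ 3 iff the list has ≥ 3 elements and its first 3 pass p
theorem takeWhile_len_ge_three (p : Char → Bool) (r : List Char) :
    3 ≤ (r.takeWhile p).length ↔ 3 ≤ r.length ∧ (r.take 3).all p := by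
  rcases r with _ | ⟨a, _ | ⟨b, _ | ⟨c, t⟩⟩⟩
  · simp
  · by_cases ha : p a <;> simp [List.takeWhile, ha]
  · by_cases ha : p a <;> by_cases hb : p b <;> simp [List.takeWhile, ha, hb]
  · by_cases ha : p a <;> by_cases hb : p b <;> by_cases hc : p c <;>
      simp [List.takeWhile, ha, hb, hc]

-- takeWhile never exceeds the list length
theorem tw_le (p : Char → Bool) (l : List Char) : (l.takeWhile p).length ≤ l.length := by
  induction l with
  | nil => simp
  | cons a t ih => by_cases h : p a <;> simp [List.takeWhile, h] <;> omega

-- ===== VERDICT (by name: the statement is the Claim_ definition above) =====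
theorem troisCons_spec : Claim_equal_troisCons := by
  intro mot _
  unfold Spec_troisCons troisCons troisCons_alt
  rw [counter_eq]
  rw [PySem.List.slice_from_neg_ofNat mot.toList 3 (by omega)]
  by_cases h3 : 3 ≤ mot.toList.length
  · have key := takeWhile_len_ge_three notVowel mot.toList.reverse
    rw [List.length_reverse] at key
    have hdrop : (mot.toList.drop (mot.toList.length - 3)).all notVowel
        = (mot.toList.reverse.take 3).all notVowel := by
      rw [← List.all_reverse, List.reverse_drop, Nat.sub_sub_self h3]
    rw [hdrop]
    by_cases h : 3 ≤ (mot.toList.reverse.takeWhile notVowel).length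
    · rw [if_pos (by exact_mod_cast h)]
      rw [(key.mp h).2, decide_eq_true h3]
      rfl
    · rw [if_neg (by exact_mod_cast h)]
      have hall : (mot.toList.reverse.take 3).all notVowel = false := by
        cases heq : (mot.toList.reverse.take 3).all notVowel
        · rfl
        · exact absurd (key.mpr ⟨h3, heq⟩) h
      rw [hall, Bool.and_false]
  · have hle := tw_le notVowel mot.toList.reverse
    rw [List.length_reverse] at hle
    have hn : ¬ 3 ≤ (mot.toList.reverse.takeWhile notVowel).length := by omega
    rw [if_neg (by exact_mod_cast hn), decide_eq_false h3, Bool.false_and]
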